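-- pv_equiv track=rewrite | github.com/k-harada/AtCoder | ABC/ABC1XX/ABC149/D.py | solve
-- ===== SOURCE A (Python) =====
-- def solve(n, k, r, s, p, t):
--     res = 0
--     u_list = [""] * n
--     for i in range(k):
--         if t[i] == "r":
--             u_list[i] = "p"
--             res += p
--         elif t[i] == "s":
--             u_list[i] = "r"
--             res += r
--         else:
--             u_list[i] = "s"
--             res += s
--
--     for i in range(k, n):
--         if t[i] == "r":
--             if u_list[i - k] != "p":
--                 u_list[i] = "p"
--                 res += p
--             else:
--                 u_list[i] = "x"
--         elif t[i] == "s":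
--             if u_list[i - k] != "r":
--                 u_list[i] = "r"
--                 res += r
--             else:
--                 u_list[i] = "x"
--         else:
--             if u_list[i - k] != "s":
--                 u_list[i] = "s"
--                 res += s
--             else:
--                 u_list[i] = "x"
--     return res
-- ===== SOURCE B (Python) =====
-- def solve(n, k, r, s, p, t):
--     # One pass with per-residue run-length state: positions i, i+k, ... form k
--     # independent chains; a maximal run of L equal opponent hands in a chain
--     # yields ceil(L/2) wins worth the beating hand's score.
--     prev = [""] * k
--     run = [0] * k
--     res = 0
--     for i in range(n):
--         c = t[i] if t[i] in ("r", "s") else "o"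
--         j = i % k
--         if c == prev[j]:
--             run[j] += 1
--         else:
--             res += (run[j] + 1) // 2 * (p if prev[j] == "r" else r if prev[j] == "s" else s)
--             prev[j], run[j] = c, 1
--     for j in range(k):
--         res += (run[j] + 1) // 2 * (p if prev[j] == "r" else r if prev[j] == "s" else s)
--     return res
-- ===== Notes on version B (the rewrite author's own statement) =====
-- stated objective: alternative
-- what changed: B drops A's auxiliary u_list of chosen hands and its i-k back-reference: it keeps one (category, run-length) counter pair per residue class and scores each maximal run of equal opponent hands as ceil(L/2) times the beating hand's score (flushed at run breaks and at the end), O(k) state instead of an O(n) hand array.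
-- outside the precondition, e.g. on solve(2, 0, 3, 5, 7, ['r', 's']): A returns 10, B raises ZeroDivisionError
import Mathlib
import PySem

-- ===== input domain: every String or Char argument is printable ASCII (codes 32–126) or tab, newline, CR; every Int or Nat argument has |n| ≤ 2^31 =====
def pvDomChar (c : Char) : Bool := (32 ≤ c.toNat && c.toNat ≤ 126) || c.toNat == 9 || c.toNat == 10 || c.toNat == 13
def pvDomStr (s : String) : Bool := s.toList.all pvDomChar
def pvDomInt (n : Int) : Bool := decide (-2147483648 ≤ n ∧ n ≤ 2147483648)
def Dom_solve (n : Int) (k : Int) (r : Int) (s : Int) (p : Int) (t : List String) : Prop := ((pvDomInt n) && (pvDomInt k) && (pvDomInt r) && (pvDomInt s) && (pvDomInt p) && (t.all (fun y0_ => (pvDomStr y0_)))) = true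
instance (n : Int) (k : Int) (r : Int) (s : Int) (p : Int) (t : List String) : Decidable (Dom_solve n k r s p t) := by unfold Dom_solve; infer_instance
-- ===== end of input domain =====

-- B replaces A's auxiliary u_list of chosen hands and its i-k back-reference by per-residue
-- run-length counters, scoring ceil(L/2) wins per maximal run of equal hands: O(k) state
-- instead of an O(n) hand array (an alternative accounting, same asymptotic cost).

-- ===== PORT A =====
-- Literal port of A. Python's raising t[i] / u_list[i] accesses are rendered with in-range
-- defaults (pyGetD / set); Pre_solve admits only inputs where every access is in range
-- (or both loops are empty), so the port is exact there.
def solve (n : Int) (k : Int) (r : Int) (s : Int) (p : Int) (t : List String) : Int :=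
  let u0 : List String := List.replicate n.toNat ""
  let st1 := (PySem.List.pyRange 0 k 1).foldl (fun (st : Int × List String) i =>
      let ti := PySem.List.pyGetD t i ""
      if ti = "r" then (st.1 + p, st.2.set i.toNat "p")
      else if ti = "s" then (st.1 + r, st.2.set i.toNat "r")
      else (st.1 + s, st.2.set i.toNat "s")) (0, u0)
  let st2 := (PySem.List.pyRange k n 1).foldl (fun (st : Int × List String) i =>
      let ti := PySem.List.pyGetD t i ""
      if ti = "r" then
        (if PySem.List.pyGetD st.2 (i - k) "" ≠ "p" then (st.1 + p, st.2.set i.toNat "p")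
         else (st.1, st.2.set i.toNat "x"))
      else if ti = "s" then
        (if PySem.List.pyGetD st.2 (i - k) "" ≠ "r" then (st.1 + r, st.2.set i.toNat "r")
         else (st.1, st.2.set i.toNat "x"))
      else
        (if PySem.List.pyGetD st.2 (i - k) "" ≠ "s" then (st.1 + s, st.2.set i.toNat "s")
         else (st.1, st.2.set i.toNat "x"))) st1
  st2.1

-- ===== PORT B =====
-- Literal port of Source B: one pass, per-residue run-length state, then a flush loop.
def solve_alt (n : Int) (k : Int) (r : Int) (s : Int) (p : Int) (t : List String) : Int :=
  let prev0 : List String := List.replicate k.toNat ""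
  let run0 : List Int := List.replicate k.toNat 0
  let st := (PySem.List.pyRange 0 n 1).foldl
    (fun (st : List String × List Int × Int) i =>
      let ti := PySem.List.pyGetD t i ""
      let c := if ti = "r" ∨ ti = "s" then ti else "o"
      let j := PySem.Int.mod i k
      let pj := PySem.List.pyGetD st.1 j ""
      let rj := PySem.List.pyGetD st.2.1 j 0
      if c = pj then (st.1, st.2.1.set j.toNat (rj + 1), st.2.2)
      else (st.1.set j.toNat c, st.2.1.set j.toNat 1,
        st.2.2 + PySem.Int.floordiv (rj + 1) 2 *
          (if pj = "r" then p else if pj = "s" then r else s)))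
    (prev0, run0, 0)
  (PySem.List.pyRange 0 k 1).foldl
    (fun (res : Int) j =>
      let pj := PySem.List.pyGetD st.1 j ""
      let rj := PySem.List.pyGetD st.2.1 j 0
      res + PySem.Int.floordiv (rj + 1) 2 *
        (if pj = "r" then p else if pj = "s" then r else s))
    st.2.2

-- ===== PRECONDITION & SPEC =====
-- Pre_ admits the problem's domain 1 <= k <= n <= len(t), plus n <= k <= 0 (both loops empty, both
-- programs return 0). It excludes the degenerate k = 0 with 1 <= n <= len(t) (outside the problem's
-- guarantee 1 <= k), where A returns a value built by comparing each hand with its own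
-- not-yet-written cell while B's i % k naturally raises ZeroDivisionError; on every other excluded
-- input A raises IndexError (k > n, n > len(t), or k < 0 < n - k).
def Pre_solve (n : Int) (k : Int) (r : Int) (s : Int) (p : Int) (t : List String) : Prop :=
  (1 ≤ k ∧ k ≤ n ∧ n ≤ (t.length : Int)) ∨ (k ≤ 0 ∧ n ≤ k)
instance (n : Int) (k : Int) (r : Int) (s : Int) (p : Int) (t : List String) : Decidable (Pre_solve n k r s p t) := by unfold Pre_solve; infer_instance

def pvWitness_solve : Int × Int × Int × Int × Int × List String := (3, 1, 1, 2, 3, ["r", "s", "p"])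

def Spec_solve (n : Int) (k : Int) (r : Int) (s : Int) (p : Int) (t : List String) (out : Int) : Prop := out = solve_alt n k r s p t
instance (n : Int) (k : Int) (r : Int) (s : Int) (p : Int) (t : List String) (out : Int) : Decidable (Spec_solve n k r s p t out) := by unfold Spec_solve; infer_instance

-- ===== CLAIM (what is proved, stated in full; the proofs are below) =====
def Claim_equal_solve : Prop := ∀ (n : Int) (k : Int) (r : Int) (s : Int) (p : Int) (t : List String), Dom_solve n k r s p t → Pre_solve n k r s p t → Spec_solve n k r s p t (solve n k r s p t)

-- ===== LEMMAS AND PROOFS =====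

/- Shared vocabulary: hand categories, the hand that beats a category, its score. -/
def pvCat (h : String) : String := if h = "r" ∨ h = "s" then h else "o"
def pvBeat (c : String) : String := if c = "r" then "p" else if c = "s" then "r" else "s"
def pvVal (r s p : Int) (c : String) : Int := if c = "r" then p else if c = "s" then r else s

/- One step of A's per-chain greedy: score iff the previous chosen hand differs from the beating hand. -/
def pvGstep (r s p : Int) (st : Int × String) (h : String) : Int × String :=
  if st.2 ≠ pvBeat (pvCat h) then (st.1 + pvVal r s p (pvCat h), pvBeat (pvCat h)) else (st.1, "x")

/- A's greedy run along chain `start` (positions start, start+K, …), first `c` elements. -/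
def pvChain (r s p : Int) (t : List String) (K start c : Nat) : Int × String :=
  (List.range c).foldl (fun st q => pvGstep r s p st (t.getD (start + K * q) "")) (0, "")

/- Number of positions i < m with i % K = start (elements of chain `start` strictly below m). -/
def pvCnt (K start : Nat) : Nat → Nat
  | 0 => 0
  | m + 1 => pvCnt K start m + (if m % K = start then 1 else 0)

/- The contents of A's u_list after the first m positions have been processed. -/
def pvU (r s p : Int) (t : List String) (K N m : Nat) : List String :=
  (List.range N).map (fun j =>
    if j < m then (pvChain r s p t K (j % K) (pvCnt K (j % K) (j + 1))).2 else "")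

def pvSum (K : Nat) (f : Nat → Int) : Int := ((List.range K).map f).sum

/- A's whole loop state after the first m positions. -/
def pvAState (r s p : Int) (t : List String) (K N m : Nat) : Int × List String :=
  (pvSum K (fun start => (pvChain r s p t K start (pvCnt K start m)).1), pvU r s p t K N m)

/- The two loop bodies of port A, named for the proofs (definitionally the port's lambdas). -/
def pvBody1 (r s p : Int) (t : List String) : Int × List String → Int → Int × List String :=
  fun st i =>
    let ti := PySem.List.pyGetD t i ""
    if ti = "r" then (st.1 + p, st.2.set i.toNat "p")
    else if ti = "s" then (st.1 + r, st.2.set i.toNat "r")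
    else (st.1 + s, st.2.set i.toNat "s")

def pvBody2 (k r s p : Int) (t : List String) : Int × List String → Int → Int × List String :=
  fun st i =>
    let ti := PySem.List.pyGetD t i ""
    if ti = "r" then
      (if PySem.List.pyGetD st.2 (i - k) "" ≠ "p" then (st.1 + p, st.2.set i.toNat "p")
       else (st.1, st.2.set i.toNat "x"))
    else if ti = "s" then
      (if PySem.List.pyGetD st.2 (i - k) "" ≠ "r" then (st.1 + r, st.2.set i.toNat "r")
       else (st.1, st.2.set i.toNat "x"))
    else
      (if PySem.List.pyGetD st.2 (i - k) "" ≠ "s" then (st.1 + s, st.2.set i.toNat "s")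
       else (st.1, st.2.set i.toNat "x"))

lemma solve_def (n k r s p : Int) (t : List String) :
    solve n k r s p t =
      ((PySem.List.pyRange k n 1).foldl (pvBody2 k r s p t)
        ((PySem.List.pyRange 0 k 1).foldl (pvBody1 r s p t)
          (0, List.replicate n.toNat ""))).1 := rfl

/- B's inner loop body, named. -/
def pvBBody (r s p : Int) (t : List String) (K start : Nat) :
    String × Int × Int → Nat → String × Int × Int :=
  fun st q =>
    let c := pvCat (t.getD (start + K * q) "")
    if c = st.1 then (st.1, st.2.1 + 1, st.2.2)
    else (c, 1, st.2.2 + PySem.Int.floordiv (st.2.1 + 1) 2 * pvVal r s p st.1)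

def pvBFold (r s p : Int) (t : List String) (K start c : Nat) (res0 : Int) : String × Int × Int :=
  (List.range c).foldl (pvBBody r s p t K start) ("", 0, res0)

-- ---------- generic helpers ----------

lemma pvSum_update (K i0 : Nat) (f f' : Nat → Int) (hi : i0 < K)
    (hne : ∀ j, j ≠ i0 → f' j = f j) :
    pvSum K f' = pvSum K f + (f' i0 - f i0) := by
  obtain ⟨d, rfl⟩ : ∃ d, K = i0 + 1 + d := ⟨K - i0 - 1, by omega⟩
  unfold pvSum
  rw [List.range_add, List.range_succ]
  simp only [List.map_append, List.sum_append, List.map_map]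
  have h1 : (List.range i0).map f' = (List.range i0).map f := by
    apply List.map_congr_left; intro j hj
    exact hne j (by simp at hj; omega)
  have h2 : (List.range d).map (f' ∘ fun x => i0 + 1 + x) =
      (List.range d).map (f ∘ fun x => i0 + 1 + x) := by
    apply List.map_congr_left; intro j _
    show f' (i0 + 1 + j) = f (i0 + 1 + j)
    exact hne _ (by omega)
  rw [h1, h2]; simp; ring

lemma pvCat_cases (h : String) : pvCat h = "r" ∨ pvCat h = "s" ∨ pvCat h = "o" := by
  unfold pvCat; split_ifs with h1
  · rcases h1 with h1 | h1 <;> simp [h1]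
  · simp

lemma pvBeat_ne (c : String) (hc : c = "r" ∨ c = "s" ∨ c = "o") :
    pvBeat c ≠ "" ∧ pvBeat c ≠ "x" := by
  rcases hc with rfl | rfl | rfl <;> simp [pvBeat]

lemma pvBeat_inj (c c' : String) (hc : c = "r" ∨ c = "s" ∨ c = "o")
    (hc' : c' = "r" ∨ c' = "s" ∨ c' = "o") (hne : c ≠ c') : pvBeat c ≠ pvBeat c' := by
  rcases hc with rfl | rfl | rfl <;> rcases hc' with rfl | rfl | rfl <;> simp_all [pvBeat]

-- ---------- pvCnt facts ----------

lemma pvCnt_stable (K start m : Nat) (h : m % K ≠ start) :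
    pvCnt K start (m + 1) = pvCnt K start m := by
  simp [pvCnt, h]

lemma pvCnt_self (K start m : Nat) (h : m % K = start) :
    pvCnt K start (m + 1) = pvCnt K start m + 1 := by
  simp [pvCnt, h]

lemma pvCnt_phase1 (K start m : Nat) (hm : m ≤ K) :
    pvCnt K start m = if start < m then 1 else 0 := by
  induction m with
  | zero => simp [pvCnt]
  | succ m ih =>
    rw [pvCnt, ih (by omega), Nat.mod_eq_of_lt (by omega)]
    split_ifs <;> omega

lemma pvPred_div (K q : Nat) (hK : 0 < K) (hq : 0 < q) : (K * q - 1) / K = q - 1 := by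
  obtain ⟨q', rfl⟩ : ∃ q', q = q' + 1 := ⟨q - 1, by omega⟩
  have e : K * (q' + 1) - 1 = (K - 1) + K * q' := by
    have := Nat.mul_le_mul_left K (show 1 ≤ q' + 1 by omega)
    cases K with
    | zero => omega
    | succ K' => ring_nf; omega
  rw [e, Nat.add_mul_div_left _ _ hK, Nat.div_eq_of_lt (by omega)]
  omega

lemma pvCnt_closed (K start N : Nat) (hK : 0 < K) (hs : start < K) :
    pvCnt K start N = if start < N then (N - 1 - start) / K + 1 else 0 := by
  induction N with
  | zero => simp [pvCnt]
  | succ N ih =>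
    rw [pvCnt, ih]
    by_cases hlt : start < N
    · have hdvd : (N % K = start) ↔ K ∣ (N - start) := by
        constructor
        · intro h; exact (Nat.modEq_iff_dvd' (by omega)).mp
            (by unfold Nat.ModEq; rw [Nat.mod_eq_of_lt hs, h])
        · intro h
          have := (Nat.modEq_iff_dvd' (show start ≤ N by omega)).mpr h
          unfold Nat.ModEq at this; rw [Nat.mod_eq_of_lt hs] at this; omega
      by_cases hd : K ∣ (N - start)
      · obtain ⟨q, hq⟩ := hd
        have hq1 : 0 < q := by
          rcases Nat.eq_zero_or_pos q with h | h
          · subst h; simp at hq; omega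
          · exact h
        have h1 : (N - 1 - start) / K = q - 1 := by
          rw [show N - 1 - start = K * q - 1 by omega]
          exact pvPred_div K q hK hq1
        have h2 : (N + 1 - 1 - start) / K = q := by
          rw [show N + 1 - 1 - start = 0 + K * q by omega, Nat.add_mul_div_left _ _ hK]
          simp
        rw [if_pos hlt, if_pos (hdvd.mpr ⟨q, hq⟩), if_pos (Nat.lt_succ_of_lt hlt), h1, h2]
        omega
      · have hmods := Nat.mod_add_div (N - start) K
        have hr : 0 < (N - start) % K := by
          rcases Nat.eq_zero_or_pos ((N - start) % K) with h | h
          · exact absurd (Nat.dvd_of_mod_eq_zero h) hd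
          · exact h
        have hrK : (N - start) % K < K := Nat.mod_lt _ hK
        have h1 : N + 1 - 1 - start = (N - start) % K + K * ((N - start) / K) := by omega
        have h2 : N - 1 - start = ((N - start) % K - 1) + K * ((N - start) / K) := by omega
        have d1 : ((N - start) % K - 1) / K = 0 := Nat.div_eq_of_lt (by omega)
        have d2 : ((N - start) % K) / K = 0 := Nat.div_eq_of_lt hrK
        rw [if_pos hlt, if_neg (fun h => hd (hdvd.mp h)), if_pos (Nat.lt_succ_of_lt hlt),
          h1, h2, Nat.add_mul_div_left _ _ hK, Nat.add_mul_div_left _ _ hK, d1, d2]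
    · by_cases heq : start = N
      · subst heq
        rw [if_neg hlt, if_pos (Nat.mod_eq_of_lt hs), if_pos (Nat.lt_succ_self start)]
        simp
      · rw [if_neg hlt, if_neg (show ¬(N % K = start) by
            intro h; have := Nat.mod_le N K; have := Nat.mod_lt N hK; omega),
          if_neg (show ¬ start < N + 1 by omega)]

lemma pvCnt_at_mod (K m : Nat) (hK : 0 < K) (hm : K ≤ m) :
    pvCnt K (m % K) m = m / K := by
  have hmod := Nat.mod_add_div m K
  have hq1 : 1 ≤ m / K := (Nat.one_le_div_iff hK).mpr hm
  have hsK : m % K < K := Nat.mod_lt _ hK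
  rw [pvCnt_closed K (m % K) m hK hsK, if_pos (by omega),
    show m - 1 - m % K = K * (m / K) - 1 by omega, pvPred_div K (m / K) hK hq1]
  omega

lemma pvCnt_window (K m : Nat) (hK : 0 < K) (hm : K ≤ m) :
    pvCnt K (m % K) (m - K + 1) = pvCnt K (m % K) m := by
  have hmod := Nat.mod_add_div m K
  have hq1 : 1 ≤ m / K := (Nat.one_le_div_iff hK).mpr hm
  have hsK : m % K < K := Nat.mod_lt _ hK
  have hb : K ≤ K * (m / K) := Nat.le_mul_of_pos_right K hq1
  have hmul : K * (m / K - 1) = K * (m / K) - K := by rw [Nat.mul_sub, Nat.mul_one]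
  rw [pvCnt_at_mod K m hK hm, pvCnt_closed K (m % K) (m - K + 1) hK hsK,
    if_pos (by omega), show m - K + 1 - 1 - m % K = K * (m / K - 1) by omega,
    Nat.mul_div_cancel_left _ hK]
  omega

-- ---------- pvChain / pvU facts ----------

lemma pvChain_succ (r s p : Int) (t : List String) (K start c : Nat) :
    pvChain r s p t K start (c + 1) =
      pvGstep r s p (pvChain r s p t K start c) (t.getD (start + K * c) "") := by
  simp [pvChain, List.range_succ]

lemma pvU_getD (r s p : Int) (t : List String) (K N m j : Nat) (hj : j < N) :
    (pvU r s p t K N m).getD j "" =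
      if j < m then (pvChain r s p t K (j % K) (pvCnt K (j % K) (j + 1))).2 else "" := by
  rw [List.getD_eq_getElem?_getD]
  simp [pvU, List.getElem?_map, List.getElem?_range hj]

lemma pvU_set (r s p : Int) (t : List String) (K N m : Nat) (hm : m < N) :
    (pvU r s p t K N m).set m (pvChain r s p t K (m % K) (pvCnt K (m % K) (m + 1))).2 =
      pvU r s p t K N (m + 1) := by
  apply List.ext_getElem
  · simp [pvU]
  · intro j h1 h2
    simp only [pvU, List.getElem_set, List.getElem_map, List.getElem_range] at *
    by_cases hjm : m = j
    · subst hjm; simp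
    · rw [if_neg hjm]
      have : (j < m) ↔ (j < m + 1) := by omega
      split_ifs with ha hb hb <;> first | rfl | omega

-- ---------- phase 1 ----------

lemma pvAState_zero (r s p : Int) (t : List String) (K N : Nat) :
    pvAState r s p t K N 0 = (0, List.replicate N "") := by
  unfold pvAState pvU pvSum
  refine Prod.ext ?_ ?_ <;> simp [pvChain, pvCnt]

lemma pvChain_zero (r s p : Int) (t : List String) (K start : Nat) :
    pvChain r s p t K start 0 = (0, "") := rfl

lemma pvAState_succ (r s p : Int) (t : List String) (K N m : Nat)
    (hK : 0 < K) (hmN : m < N)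
    (hidx : m % K + K * pvCnt K (m % K) m = m) :
    pvAState r s p t K N (m + 1) =
      (pvSum K (fun start => (pvChain r s p t K start (pvCnt K start m)).1) +
        ((pvGstep r s p (pvChain r s p t K (m % K) (pvCnt K (m % K) m)) (t.getD m "")).1 -
          (pvChain r s p t K (m % K) (pvCnt K (m % K) m)).1),
       (pvU r s p t K N m).set m
         (pvGstep r s p (pvChain r s p t K (m % K) (pvCnt K (m % K) m)) (t.getD m "")).2) := by
  have hchain : pvChain r s p t K (m % K) (pvCnt K (m % K) (m + 1)) =
      pvGstep r s p (pvChain r s p t K (m % K) (pvCnt K (m % K) m)) (t.getD m "") := by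
    rw [pvCnt_self K (m % K) m rfl, pvChain_succ, hidx]
  refine Prod.ext ?_ ?_
  · show pvSum K (fun start => (pvChain r s p t K start (pvCnt K start (m + 1))).1) = _
    rw [pvSum_update K (m % K)
      (fun start => (pvChain r s p t K start (pvCnt K start m)).1)
      (fun start => (pvChain r s p t K start (pvCnt K start (m + 1))).1)
      (Nat.mod_lt _ hK)
      (fun j hj => by
        have hst := pvCnt_stable K j m (fun h => hj (h ▸ rfl))
        simp only [hst])]
    rw [hchain]
  · show pvU r s p t K N (m + 1) = _
    rw [← pvU_set r s p t K N m hmN, hchain]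

lemma pvBody1_step (r s p : Int) (t : List String) (K N M : Nat) (hM : M < K) (hN : M < N) :
    pvBody1 r s p t (pvAState r s p t K N M) (M : Int) = pvAState r s p t K N (M + 1) := by
  have hmod : M % K = M := Nat.mod_eq_of_lt hM
  have hcnt : pvCnt K M M = 0 := by
    rw [pvCnt_phase1 K M M (le_of_lt hM), if_neg (lt_irrefl M)]
  have hidx : M % K + K * pvCnt K (M % K) M = M := by rw [hmod, hcnt]; omega
  rw [pvAState_succ r s p t K N M (by omega) hN hidx, hmod, hcnt, pvChain_zero]
  unfold pvBody1 pvAState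
  rw [PySem.List.pyGetD_natCast]
  generalize t.getD M "" = v
  by_cases h1 : v = "r"
  · simp [h1, pvGstep, pvCat, pvBeat, pvVal]
  · by_cases h2 : v = "s"
    · simp [h1, h2, pvGstep, pvCat, pvBeat, pvVal]
    · simp [h1, h2, pvGstep, pvCat, pvBeat, pvVal]

lemma pvPhase1_aux (r s p : Int) (t : List String) (K N : Nat) (hKN : K ≤ N) :
    ∀ M, M ≤ K →
      (List.map (fun j => Int.ofNat j) (List.range M)).foldl (pvBody1 r s p t)
        (0, List.replicate N "") = pvAState r s p t K N M := by
  intro M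
  induction M with
  | zero => intro _; simp [pvAState_zero]
  | succ M ih =>
    intro hM
    rw [List.range_succ, List.map_append, List.foldl_append, ih (by omega)]
    simp only [List.map_cons, List.map_nil, List.foldl_cons, List.foldl_nil]
    exact pvBody1_step r s p t K N M (by omega) (by omega)

lemma pvPhase1 (r s p : Int) (t : List String) (K N : Nat) (hKN : K ≤ N) :
    (List.map (fun j => Int.ofNat j) (List.range K)).foldl (pvBody1 r s p t)
        (0, List.replicate N "") = pvAState r s p t K N K :=
  pvPhase1_aux r s p t K N hKN K (le_refl K)

-- ---------- phase 2 ----------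

lemma pvBody2_step (k r s p : Int) (t : List String) (K N m : Nat)
    (hk : k = (K : Int)) (hK : 0 < K) (hm : K ≤ m) (hmN : m < N) :
    pvBody2 k r s p t (pvAState r s p t K N m) (m : Int) = pvAState r s p t K N (m + 1) := by
  have hidx : m % K + K * pvCnt K (m % K) m = m := by
    rw [pvCnt_at_mod K m hK hm]; exact Nat.mod_add_div m K
  rw [pvAState_succ r s p t K N m hK hmN hidx]
  unfold pvBody2 pvAState
  have hsub : ((m : Int)) - k = ((m - K : Nat) : Int) := by rw [hk]; omega
  rw [hsub, PySem.List.pyGetD_natCast, PySem.List.pyGetD_natCast]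
  have hprev : (pvU r s p t K N m).getD (m - K) "" =
      (pvChain r s p t K (m % K) (pvCnt K (m % K) m)).2 := by
    rw [pvU_getD r s p t K N m (m - K) (by omega), if_pos (by omega)]
    have h1 : (m - K) % K = m % K := by
      have h2 := Nat.sub_mul_mod (x := m) (k := 1) (n := K) (by omega)
      simpa using h2
    rw [h1, pvCnt_window K m hK hm]
  rw [hprev]
  simp only [Int.toNat_natCast]
  generalize t.getD m "" = v
  generalize hA : pvChain r s p t K (m % K) (pvCnt K (m % K) m) = a
  by_cases h1 : v = "r"
  · by_cases hp : a.2 = "p" <;>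
      simp [h1, hp, pvGstep, pvCat, pvBeat, pvVal]
  · by_cases h2 : v = "s"
    · by_cases hp : a.2 = "r" <;>
        simp [h1, h2, hp, pvGstep, pvCat, pvBeat, pvVal]
    · by_cases hp : a.2 = "s" <;>
        simp [h1, h2, hp, pvGstep, pvCat, pvBeat, pvVal]

lemma pvPhase2_aux (k r s p : Int) (t : List String) (K N : Nat)
    (hk : k = (K : Int)) (hK : 0 < K) :
    ∀ M, K + M ≤ N →
      (List.map (fun j => k + Int.ofNat j) (List.range M)).foldl (pvBody2 k r s p t)
        (pvAState r s p t K N K) = pvAState r s p t K N (K + M) := by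
  intro M
  induction M with
  | zero => intro _; simp
  | succ M ih =>
    intro hM
    rw [List.range_succ, List.map_append, List.foldl_append, ih (by omega)]
    simp only [List.map_cons, List.map_nil, List.foldl_cons, List.foldl_nil]
    have hcast : k + Int.ofNat M = ((K + M : Nat) : Int) := by
      rw [hk, Int.ofNat_eq_natCast]; push_cast; ring
    rw [hcast]
    exact pvBody2_step k r s p t K N (K + M) hk hK (by omega) (by omega)

lemma pvSolveA (n k r s p : Int) (t : List String) (K N : Nat)
    (hk : k = (K : Int)) (hn : n = (N : Int)) (hK : 0 < K) (hKN : K ≤ N) :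
    solve n k r s p t =
      pvSum K (fun start => (pvChain r s p t K start (pvCnt K start N)).1) := by
  rw [solve_def]
  have hr1 : PySem.List.pyRange 0 k 1 = List.map (fun j => Int.ofNat j) (List.range K) := by
    rw [hk, PySem.List.pyRange_zero_natCast]
    simp [Int.ofNat_eq_natCast]
  have hr2 : PySem.List.pyRange k n 1 =
      List.map (fun j => k + Int.ofNat j) (List.range (N - K)) := by
    rw [PySem.List.pyRange_one k n, show (n - k).toNat = N - K by omega]
    simp [Int.ofNat_eq_natCast]
  have htn : n.toNat = N := by omega
  rw [hr1, hr2, htn, pvPhase1 r s p t K N hKN,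
    pvPhase2_aux k r s p t K N hk hK (N - K) (by omega),
    show K + (N - K) = N by omega]
  rfl


-- ---------- B side ----------

lemma pvBFold_succ (r s p : Int) (t : List String) (K start c : Nat) (res0 : Int) :
    pvBFold r s p t K start (c + 1) res0 =
      pvBBody r s p t K start (pvBFold r s p t K start c res0) c := by
  simp [pvBFold, List.range_succ]

lemma pvBFold_rel (r s p : Int) (t : List String) (K start : Nat) (c : Nat) (res0 : Int) :
    0 ≤ (pvBFold r s p t K start c res0).2.1 ∧
    ((pvBFold r s p t K start c res0).1 = "" ∨ (pvBFold r s p t K start c res0).1 = "r" ∨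
      (pvBFold r s p t K start c res0).1 = "s" ∨ (pvBFold r s p t K start c res0).1 = "o") ∧
    ((pvBFold r s p t K start c res0).1 = "" ↔ (pvBFold r s p t K start c res0).2.1 = 0) ∧
    (pvBFold r s p t K start c res0).2.2 +
        PySem.Int.floordiv ((pvBFold r s p t K start c res0).2.1 + 1) 2 *
          pvVal r s p (pvBFold r s p t K start c res0).1 =
      res0 + (pvChain r s p t K start c).1 ∧
    (pvChain r s p t K start c).2 =
      (if (pvBFold r s p t K start c res0).2.1 = 0 then ""
       else if (pvBFold r s p t K start c res0).2.1 % 2 = 1 then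
         pvBeat (pvBFold r s p t K start c res0).1
       else "x") := by
  induction c with
  | zero =>
    refine ⟨le_refl 0, Or.inl rfl, by simp [pvBFold], ?_, by simp [pvBFold, pvChain]⟩
    show res0 + PySem.Int.floordiv (0 + 1) 2 * pvVal r s p "" = res0 + (pvChain r s p t K start 0).1
    rw [show PySem.Int.floordiv (0 + 1 : Int) 2 = 0 by decide, pvChain_zero]
    ring
  | succ c ih =>
    obtain ⟨hrun, hcases, hiff, hres, hstate⟩ := ih
    rw [pvBFold_succ, pvChain_succ]
    set b := pvBFold r s p t K start c res0 with hb
    set a := pvChain r s p t K start c with ha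
    set h := t.getD (start + K * c) "" with hh
    unfold pvBBody pvGstep
    simp only [← hh]
    set cc := pvCat h with hc
    have hcc : cc = "r" ∨ cc = "s" ∨ cc = "o" := pvCat_cases h
    have hccne : cc ≠ "" := by rcases hcc with h1 | h1 | h1 <;> rw [h1] <;> decide
    by_cases hceq : cc = b.1
    · have hbne : b.1 ≠ "" := fun hx => hccne (hceq.trans hx)
      have hrun0 : ¬ b.2.1 = 0 := fun h0 => hbne (hiff.mpr h0)
      rw [if_pos hceq]
      by_cases hpar : b.2.1 % 2 = 1
      · have ha2 : a.2 = pvBeat b.1 := by rw [hstate, if_neg hrun0, if_pos hpar]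
        rw [if_neg (show ¬ a.2 ≠ pvBeat cc by rw [ha2, hceq]; simp)]
        dsimp only
        have hfd : PySem.Int.floordiv (b.2.1 + 1 + 1) 2 = PySem.Int.floordiv (b.2.1 + 1) 2 := by
          rw [PySem.Int.floordiv_eq_ediv_of_pos (by norm_num),
            PySem.Int.floordiv_eq_ediv_of_pos (by norm_num)]
          omega
        refine ⟨by omega, Or.inr (hceq ▸ hcc), ?_, ?_, ?_⟩
        · exact ⟨fun hx => absurd hx hbne, fun hx => absurd hx (by omega)⟩
        · show b.2.2 + PySem.Int.floordiv (b.2.1 + 1 + 1) 2 * pvVal r s p b.1 = res0 + a.1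
          rw [hfd]; exact hres
        · show "x" = if b.2.1 + 1 = 0 then "" else if (b.2.1 + 1) % 2 = 1 then _ else "x"
          rw [if_neg (by omega), if_neg (by omega)]
      · have ha2 : a.2 = "x" := by rw [hstate, if_neg hrun0, if_neg hpar]
        rw [if_pos (show a.2 ≠ pvBeat cc by
          rw [ha2]; exact fun hx => (pvBeat_ne cc hcc).2 hx.symm)]
        dsimp only
        have hfd : PySem.Int.floordiv (b.2.1 + 1 + 1) 2 =
            PySem.Int.floordiv (b.2.1 + 1) 2 + 1 := by
          rw [PySem.Int.floordiv_eq_ediv_of_pos (by norm_num),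
            PySem.Int.floordiv_eq_ediv_of_pos (by norm_num)]
          omega
        refine ⟨by omega, Or.inr (hceq ▸ hcc), ?_, ?_, ?_⟩
        · exact ⟨fun hx => absurd hx hbne, fun hx => absurd hx (by omega)⟩
        · show b.2.2 + PySem.Int.floordiv (b.2.1 + 1 + 1) 2 * pvVal r s p b.1 =
            res0 + (a.1 + pvVal r s p cc)
          rw [hfd, hceq]
          linear_combination hres
        · show pvBeat cc = if b.2.1 + 1 = 0 then "" else if (b.2.1 + 1) % 2 = 1 then _ else "x"
          rw [if_neg (by omega), if_pos (by omega), hceq]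
    · rw [if_neg hceq]
      have hane : a.2 ≠ pvBeat cc := by
        rw [hstate]
        split_ifs with hz hp
        · exact fun hx => (pvBeat_ne cc hcc).1 hx.symm
        · have hb1 : b.1 = "r" ∨ b.1 = "s" ∨ b.1 = "o" := by
            rcases hcases with h1 | h1
            · exact absurd (hiff.mp h1) hz
            · exact h1
          exact pvBeat_inj b.1 cc hb1 hcc (fun hx => hceq hx.symm)
        · exact fun hx => (pvBeat_ne cc hcc).2 hx.symm
      rw [if_pos hane]
      dsimp only
      refine ⟨by omega, Or.inr hcc, ?_, ?_, ?_⟩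
      · exact ⟨fun hx => absurd hx hccne, fun hx => absurd hx (by norm_num)⟩
      · show b.2.2 + PySem.Int.floordiv (b.2.1 + 1) 2 * pvVal r s p b.1 +
            PySem.Int.floordiv (1 + 1) 2 * pvVal r s p cc = res0 + (a.1 + pvVal r s p cc)
        rw [show PySem.Int.floordiv (1 + 1 : Int) 2 = 1 by decide]
        linear_combination hres
      · show pvBeat cc = if (1 : Int) = 0 then "" else if (1 : Int) % 2 = 1 then pvBeat cc else "x"
        norm_num

lemma pvBChain (r s p : Int) (t : List String) (K start c : Nat) (res0 : Int) :
    (pvBFold r s p t K start c res0).2.2 +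
        PySem.Int.floordiv ((pvBFold r s p t K start c res0).2.1 + 1) 2 *
          pvVal r s p (pvBFold r s p t K start c res0).1 =
      res0 + (pvChain r s p t K start c).1 :=
  (pvBFold_rel r s p t K start c res0).2.2.2.1

lemma pvIdx (K m : Nat) (hK : 0 < K) : m % K + K * pvCnt K (m % K) m = m := by
  by_cases hm : m < K
  · rw [Nat.mod_eq_of_lt hm, pvCnt_phase1 K m m (le_of_lt hm), if_neg (lt_irrefl m)]
    omega
  · rw [pvCnt_at_mod K m hK (by omega)]
    exact Nat.mod_add_div m K

lemma pvSetMapRange {α : Type} (K i : Nat) (f g : Nat → α) (x : α) (hi : i < K)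
    (hx : x = g i) (h : ∀ j, j ≠ i → f j = g j) :
    ((List.range K).map f).set i x = (List.range K).map g := by
  apply List.ext_getElem
  · simp
  · intro j h1 h2
    simp only [List.getElem_set, List.getElem_map, List.getElem_range] at *
    by_cases hij : i = j
    · subst hij; simpa using hx
    · rw [if_neg hij]
      exact h j (fun hj => hij hj.symm)

lemma pvSum_congr (K : Nat) (f g : Nat → Int) (h : ∀ j, j < K → f j = g j) :
    pvSum K f = pvSum K g := by
  unfold pvSum
  exact congrArg List.sum (List.map_congr_left (fun j hj => h j (List.mem_range.mp hj)))

/- B's loop bodies, named for the proofs (definitionally the port's lambdas). -/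
def pvCBody (k r s p : Int) (t : List String) :
    List String × List Int × Int → Int → List String × List Int × Int :=
  fun st i =>
    let ti := PySem.List.pyGetD t i ""
    let c := if ti = "r" ∨ ti = "s" then ti else "o"
    let j := PySem.Int.mod i k
    let pj := PySem.List.pyGetD st.1 j ""
    let rj := PySem.List.pyGetD st.2.1 j 0
    if c = pj then (st.1, st.2.1.set j.toNat (rj + 1), st.2.2)
    else (st.1.set j.toNat c, st.2.1.set j.toNat 1,
      st.2.2 + PySem.Int.floordiv (rj + 1) 2 *
        (if pj = "r" then p else if pj = "s" then r else s))

def pvFBody (r s p : Int) (prevl : List String) (runl : List Int) : Int → Int → Int :=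
  fun res j =>
    res + PySem.Int.floordiv (PySem.List.pyGetD runl j 0 + 1) 2 *
      (if PySem.List.pyGetD prevl j "" = "r" then p
       else if PySem.List.pyGetD prevl j "" = "s" then r else s)

lemma solve_alt_def (n k r s p : Int) (t : List String) :
    solve_alt n k r s p t =
      (PySem.List.pyRange 0 k 1).foldl
        (pvFBody r s p
          ((PySem.List.pyRange 0 n 1).foldl (pvCBody k r s p t)
            (List.replicate k.toNat "", List.replicate k.toNat 0, 0)).1
          ((PySem.List.pyRange 0 n 1).foldl (pvCBody k r s p t)
            (List.replicate k.toNat "", List.replicate k.toNat 0, 0)).2.1)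
        ((PySem.List.pyRange 0 n 1).foldl (pvCBody k r s p t)
          (List.replicate k.toNat "", List.replicate k.toNat 0, 0)).2.2 := rfl

/- B's whole loop state after the first m positions. -/
def pvBState (r s p : Int) (t : List String) (K m : Nat) : List String × List Int × Int :=
  ((List.range K).map (fun st => (pvBFold r s p t K st (pvCnt K st m) 0).1),
   (List.range K).map (fun st => (pvBFold r s p t K st (pvCnt K st m) 0).2.1),
   pvSum K (fun st => (pvBFold r s p t K st (pvCnt K st m) 0).2.2))

lemma pvBState_zero (r s p : Int) (t : List String) (K : Nat) :
    pvBState r s p t K 0 = (List.replicate K "", List.replicate K 0, 0) := by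
  unfold pvBState pvSum
  refine Prod.ext ?_ (Prod.ext ?_ ?_) <;> simp [pvBFold, pvCnt]

lemma pvCBody_step (k r s p : Int) (t : List String) (K m : Nat)
    (hk : k = (K : Int)) (hK : 0 < K) :
    pvCBody k r s p t (pvBState r s p t K m) (m : Int) = pvBState r s p t K (m + 1) := by
  have hjK : m % K < K := Nat.mod_lt _ hK
  unfold pvCBody pvBState
  simp only [hk, PySem.Int.mod_natCast, PySem.List.pyGetD_natCast, Int.toNat_natCast]
  rw [PySem.List.getD_map_range _ _ _ _ hjK, PySem.List.getD_map_range _ _ _ _ hjK]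
  have helem : t.getD (m % K + K * pvCnt K (m % K) m) "" = t.getD m "" := by
    rw [pvIdx K m hK]
  have hsucc : pvBFold r s p t K (m % K) (pvCnt K (m % K) (m + 1)) 0 =
      pvBBody r s p t K (m % K) (pvBFold r s p t K (m % K) (pvCnt K (m % K) m) 0)
        (pvCnt K (m % K) m) := by
    rw [pvCnt_self K (m % K) m rfl, pvBFold_succ]
  have hbody : pvBBody r s p t K (m % K) (pvBFold r s p t K (m % K) (pvCnt K (m % K) m) 0)
      (pvCnt K (m % K) m) =
      (if (if t.getD m "" = "r" ∨ t.getD m "" = "s" then t.getD m "" else "o") =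
          (pvBFold r s p t K (m % K) (pvCnt K (m % K) m) 0).1 then
        ((pvBFold r s p t K (m % K) (pvCnt K (m % K) m) 0).1,
         (pvBFold r s p t K (m % K) (pvCnt K (m % K) m) 0).2.1 + 1,
         (pvBFold r s p t K (m % K) (pvCnt K (m % K) m) 0).2.2)
      else ((if t.getD m "" = "r" ∨ t.getD m "" = "s" then t.getD m "" else "o"), 1,
        (pvBFold r s p t K (m % K) (pvCnt K (m % K) m) 0).2.2 +
          PySem.Int.floordiv ((pvBFold r s p t K (m % K) (pvCnt K (m % K) m) 0).2.1 + 1) 2 *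
            pvVal r s p (pvBFold r s p t K (m % K) (pvCnt K (m % K) m) 0).1)) := by
    unfold pvBBody pvCat
    rw [helem]
  by_cases hc : (if t.getD m "" = "r" ∨ t.getD m "" = "s" then t.getD m "" else "o") =
      (pvBFold r s p t K (m % K) (pvCnt K (m % K) m) 0).1
  · rw [if_pos hc]
    refine Prod.ext ?_ (Prod.ext ?_ ?_)
    · show (List.range K).map _ = (List.range K).map _
      apply List.map_congr_left
      intro st _
      by_cases hstj : st = m % K
      · subst hstj
        rw [hsucc, hbody, if_pos hc]
      · rw [pvCnt_stable K st m (fun hx => hstj (hx ▸ rfl))]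
    · show (((List.range K).map _).set (m % K) _) = (List.range K).map _
      apply pvSetMapRange K (m % K) _ _ _ hjK
      · rw [hsucc, hbody, if_pos hc]
      · intro st hstj
        rw [pvCnt_stable K st m (fun hx => hstj (hx ▸ rfl))]
    · show pvSum K _ = pvSum K _
      apply pvSum_congr
      intro st _
      by_cases hstj : st = m % K
      · subst hstj
        rw [hsucc, hbody, if_pos hc]
      · rw [pvCnt_stable K st m (fun hx => hstj (hx ▸ rfl))]
  · rw [if_neg hc]
    refine Prod.ext ?_ (Prod.ext ?_ ?_)
    · show (((List.range K).map _).set (m % K) _) = (List.range K).map _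
      apply pvSetMapRange K (m % K) _ _ _ hjK
      · rw [hsucc, hbody, if_neg hc]
      · intro st hstj
        rw [pvCnt_stable K st m (fun hx => hstj (hx ▸ rfl))]
    · show (((List.range K).map _).set (m % K) _) = (List.range K).map _
      apply pvSetMapRange K (m % K) _ _ _ hjK
      · rw [hsucc, hbody, if_neg hc]
      · intro st hstj
        rw [pvCnt_stable K st m (fun hx => hstj (hx ▸ rfl))]
    · show pvSum K _ + _ = pvSum K _
      rw [pvSum_update K (m % K)
        (fun st => (pvBFold r s p t K st (pvCnt K st m) 0).2.2)
        (fun st => (pvBFold r s p t K st (pvCnt K st (m + 1)) 0).2.2) hjK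
        (fun st hstj => by
          have hst := pvCnt_stable K st m (fun hx => hstj (hx ▸ rfl))
          simp only [hst])]
      rw [hsucc, hbody, if_neg hc]
      unfold pvVal
      ring

lemma pvBPhase (k r s p : Int) (t : List String) (K : Nat)
    (hk : k = (K : Int)) (hK : 0 < K) :
    ∀ M, (List.map (fun j => Int.ofNat j) (List.range M)).foldl (pvCBody k r s p t)
        (List.replicate K "", List.replicate K 0, 0) = pvBState r s p t K M := by
  intro M
  induction M with
  | zero => simp [pvBState_zero]
  | succ M ih =>
    rw [List.range_succ, List.map_append, List.foldl_append, ih]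
    simp only [List.map_cons, List.map_nil, List.foldl_cons, List.foldl_nil]
    exact pvCBody_step k r s p t K M hk hK

lemma pvFlushB (k r s p : Int) (t : List String) (K N : Nat)
    (hk : k = (K : Int)) (hK : 0 < K) :
    (PySem.List.pyRange 0 k 1).foldl
        (pvFBody r s p (pvBState r s p t K N).1 (pvBState r s p t K N).2.1)
        (pvBState r s p t K N).2.2 =
      pvSum K (fun start => (pvChain r s p t K start (pvCnt K start N)).1) := by
  rw [show PySem.List.pyRange 0 k 1 = (List.range K).map (fun j => ((j : Nat) : Int)) by
      rw [hk, PySem.List.pyRange_zero_natCast],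
    List.foldl_map]
  rw [PySem.List.foldl_congr_mem _ _
    (fun (res : Int) (j : Nat) => res +
      PySem.Int.floordiv ((pvBFold r s p t K j (pvCnt K j N) 0).2.1 + 1) 2 *
        pvVal r s p (pvBFold r s p t K j (pvCnt K j N) 0).1) _
    (by
      intro acc j hj
      have hjK := List.mem_range.mp hj
      unfold pvFBody pvBState pvVal
      rw [PySem.List.pyGetD_natCast, PySem.List.pyGetD_natCast,
        PySem.List.getD_map_range _ _ _ _ hjK, PySem.List.getD_map_range _ _ _ _ hjK])]
  rw [PySem.List.foldl_add]
  show (pvBState r s p t K N).2.2 + _ = _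
  unfold pvBState pvSum
  rw [← PySem.List.sum_map_add_int]
  exact congrArg List.sum (List.map_congr_left (fun st _ => by
    have h2 := pvBChain r s p t K st (pvCnt K st N) 0
    linear_combination h2))

lemma pvSolveB (n k r s p : Int) (t : List String) (K N : Nat)
    (hk : k = (K : Int)) (hn : n = (N : Int)) (hK : 0 < K) :
    solve_alt n k r s p t =
      pvSum K (fun start => (pvChain r s p t K start (pvCnt K start N)).1) := by
  rw [solve_alt_def]
  have htn : k.toNat = K := by omega
  rw [htn,
    show PySem.List.pyRange 0 n 1 = (List.range N).map (fun j => Int.ofNat j) by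
      rw [hn, PySem.List.pyRange_zero_natCast]; simp [Int.ofNat_eq_natCast],
    pvBPhase k r s p t K hk hK N]
  exact pvFlushB k r s p t K N hk hK

-- ===== VERDICT (by name: the statement is the Claim_ definition above) =====\n-- ===== VERDICT (by name: the statement is the Claim_ definition above) =====
theorem solve_spec : Claim_equal_solve := by
  intro n k r s p t _hdom hpre
  unfold Spec_solve
  rcases hpre with ⟨hk1, hkn, hnt⟩ | ⟨hk0, hnk⟩
  · have hK : 0 < k.toNat := by omega
    have hk : k = (k.toNat : Int) := by omega
    have hn : n = (n.toNat : Int) := by omega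
    have hKN : k.toNat ≤ n.toNat := by omega
    rw [pvSolveA n k r s p t k.toNat n.toNat hk hn hK hKN,
        pvSolveB n k r s p t k.toNat n.toNat hk hn hK]
  · rw [solve_def]
    rw [PySem.List.pyRange_one_eq_nil hk0, PySem.List.pyRange_one_eq_nil hnk]
    show (0 : Int) = solve_alt n k r s p t
    rw [solve_alt_def]
    rw [PySem.List.pyRange_one_eq_nil hk0, PySem.List.pyRange_one_eq_nil (by omega : n ≤ 0)]
    rfl
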